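-- pv_equiv track=rewrite | github.com/katex35/password-crack | app.py | generate_passwords_in_range
-- ===== SOURCE A (Python) =====
-- import string
--
-- def generate_passwords_in_range(start, end, length):
--     characters = string.ascii_letters + string.digits
--     total = len(characters)
--
--     passwords = []
--     for i in range(start, end):
--         password = ""
--         n = i
--         for _ in range(length):
--             password = characters[n % total] + password
--             n //= total
--         passwords.append(password)
--         if len(passwords) >= 10000:
--             yield passwords
--             passwords = []
--     if passwords:
--         yield passwords
-- ===== SOURCE B (Python) =====
-- import string
--
-- def generate_passwords_in_range(start, end, length):
--     characters = string.ascii_letters + string.digits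
--     total = len(characters)
--     if end <= start:
--         return  # empty range: nothing to yield, no digit list needed
--     # digit list of `start` in base 62, least-significant first
--     digits = []
--     n = start
--     for _ in range(length):
--         digits.append(n % total)
--         n //= total
--     batch = []
--     for _ in range(end - start):
--         batch.append("".join(characters[d] for d in reversed(digits)))
--         # odometer increment with carry, dropping carry off the top
--         carry = 1
--         nd = []
--         for d in digits:
--             d += carry
--             carry = d // total
--             nd.append(d % total)
--         digits = nd
--         if len(batch) >= 10000:
--             yield batch
--             batch = []
--     if batch:
--         yield batch
-- ===== Notes on version B (the rewrite author's own statement) =====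
-- stated objective: alternative
-- what changed: Instead of recomputing every password from scratch with a fresh mod/div loop per index, B computes the base-62 digit list of `start` once and then advances it like an odometer (carry-propagating increment) for each subsequent index, joining the current digits into the password each step; batching at 10000 is unchanged.
import Mathlib
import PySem

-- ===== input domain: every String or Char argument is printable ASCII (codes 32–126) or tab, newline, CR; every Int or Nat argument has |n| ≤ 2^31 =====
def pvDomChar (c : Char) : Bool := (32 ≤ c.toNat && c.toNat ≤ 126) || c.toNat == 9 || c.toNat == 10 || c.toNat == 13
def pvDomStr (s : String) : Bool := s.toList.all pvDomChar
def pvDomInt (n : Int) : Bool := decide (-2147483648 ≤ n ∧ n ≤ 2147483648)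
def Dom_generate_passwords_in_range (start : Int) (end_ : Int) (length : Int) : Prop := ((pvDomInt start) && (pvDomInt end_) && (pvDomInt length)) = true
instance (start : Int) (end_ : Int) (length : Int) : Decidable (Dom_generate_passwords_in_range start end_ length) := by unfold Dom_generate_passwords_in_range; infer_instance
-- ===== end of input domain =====

-- B replaces A's per-index mod/div digit recomputation by a single digit list for `start`
-- advanced with an odometer-style carry increment; return-value equivalence (the Python
-- originals are generators; the ports return the list of yielded batches).

-- ===== PORT A =====
-- characters = string.ascii_letters + string.digits (62 chars); indexing is always in range here
def pvChars : List Char := "abcdefghijklmnopqrstuvwxyzABCDEFGHIJKLMNOPQRSTUVWXYZ0123456789".toList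
def pvCharAt (d : Int) : Char := (PySem.List.pyGet? pvChars d).getD ' '

-- the Python string `password` is ported as its List Char (prepend = cons), materialised
-- with String.mk when appended to the batch
def generate_passwords_in_range (start : Int) (end_ : Int) (length : Int) : List (List String) :=
  let total : Int := 62  -- len(characters)
  let fin := (PySem.List.pyRange start end_ 1).foldl
    (fun (st : List (List String) × List String) i =>
      let inner := (PySem.List.pyRange 0 length 1).foldl
        (fun (pn : List Char × Int) _ =>
          (pvCharAt (PySem.Int.mod pn.2 total) :: pn.1, PySem.Int.floordiv pn.2 total))
        ([], i)
      let passwords := st.2 ++ [String.mk inner.1]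
      if 10000 ≤ passwords.length then (st.1 ++ [passwords], []) else (st.1, passwords))
    ([], [])
  if fin.2 ≠ [] then fin.1 ++ [fin.2] else fin.1

-- ===== PORT B =====
-- odometer increment: add `carry` through the digit list (least-significant first)
def pvIncGo (total : Int) (carry : Int) : List Int → List Int
  | [] => []
  | d :: rest =>
      PySem.Int.mod (d + carry) total :: pvIncGo total (PySem.Int.floordiv (d + carry) total) rest

def generate_passwords_in_range_alt (start : Int) (end_ : Int) (length : Int) : List (List String) :=
  let total : Int := 62  -- len(characters)
  if end_ ≤ start then [] else  -- empty range: nothing to yield, no digit list needed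
  let init := (PySem.List.pyRange 0 length 1).foldl
    (fun (dn : List Int × Int) _ =>
      (dn.1 ++ [PySem.Int.mod dn.2 total], PySem.Int.floordiv dn.2 total))
    ([], start)
  let fin := (PySem.List.pyRange 0 (end_ - start) 1).foldl
    (fun (st : List (List String) × List String × List Int) _ =>
      let batch := st.2.1 ++ [String.mk (st.2.2.reverse.map pvCharAt)]
      let digits := pvIncGo total 1 st.2.2
      if 10000 ≤ batch.length then (st.1 ++ [batch], [], digits) else (st.1, batch, digits))
    ([], [], init.1)
  if fin.2.1 ≠ [] then fin.1 ++ [fin.2.1] else fin.1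

-- ===== PRECONDITION & SPEC =====
def Spec_generate_passwords_in_range (start : Int) (end_ : Int) (length : Int) (out : List (List String)) : Prop := out = generate_passwords_in_range_alt start end_ length
instance (start : Int) (end_ : Int) (length : Int) (out : List (List String)) : Decidable (Spec_generate_passwords_in_range start end_ length out) := by unfold Spec_generate_passwords_in_range; infer_instance

-- ===== CLAIM (what is proved, stated in full; the proofs are below) =====
def Claim_equal_generate_passwords_in_range : Prop := ∀ (start : Int) (end_ : Int) (length : Int), Dom_generate_passwords_in_range start end_ length → Spec_generate_passwords_in_range start end_ length (generate_passwords_in_range start end_ length)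

-- ===== LEMMAS AND PROOFS =====

-- base-62 digits of n, least-significant first, exactly `k` of them (Python floor semantics)
def digitsOf : Nat → Int → List Int
  | 0, _ => []
  | k+1, n => PySem.Int.mod n 62 :: digitsOf k (PySem.Int.floordiv n 62)

-- n //= 62, k times
def divIter : Nat → Int → Int
  | 0, n => n
  | k+1, n => divIter k (PySem.Int.floordiv n 62)

-- the password both programs produce for index i at width k
def pwOf (k : Nat) (i : Int) : String := String.mk ((digitsOf k i).reverse.map pvCharAt)

-- common abstract loop: k indices starting at i, batching at 10000
def goSpec (len : Nat) : Nat → Int → List (List String) → List String → List (List String)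
  | 0, _, out, batch => if batch ≠ [] then out ++ [batch] else out
  | k+1, i, out, batch =>
      let batch' := batch ++ [pwOf len i]
      if 10000 ≤ batch'.length then goSpec len k (i+1) (out ++ [batch']) []
      else goSpec len k (i+1) out batch'

lemma incGo_digitsOf (k : Nat) : ∀ (n c : Int), 0 ≤ c →
    pvIncGo 62 c (digitsOf k n) = digitsOf k (n + c) := by
  induction k with
  | zero => intro n c _; rfl
  | succ k ih =>
      intro n c hc
      simp only [digitsOf, pvIncGo,
        PySem.Int.mod_eq_emod_of_pos (by norm_num : (0:Int) < 62),
        PySem.Int.floordiv_eq_ediv_of_pos (by norm_num : (0:Int) < 62)]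
      congr 1
      · omega
      · rw [ih _ _ (by omega)]
        congr 1
        omega

lemma innerA_fold (l : List Int) : ∀ (n : Int) (acc : List Char),
    l.foldl (fun (pn : List Char × Int) _ =>
        (pvCharAt (PySem.Int.mod pn.2 62) :: pn.1, PySem.Int.floordiv pn.2 62)) (acc, n)
      = ((digitsOf l.length n).reverse.map pvCharAt ++ acc, divIter l.length n) := by
  induction l with
  | nil => intro n acc; rfl
  | cons x xs ih =>
      intro n acc
      simp only [List.foldl_cons, List.length_cons, digitsOf, divIter, ih,
        List.reverse_cons, List.map_append, List.map_cons, List.map_nil,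
        List.append_assoc, List.singleton_append]

lemma initB_fold (l : List Int) : ∀ (n : Int) (acc : List Int),
    l.foldl (fun (dn : List Int × Int) _ =>
        (dn.1 ++ [PySem.Int.mod dn.2 62], PySem.Int.floordiv dn.2 62)) (acc, n)
      = (acc ++ digitsOf l.length n, divIter l.length n) := by
  induction l with
  | nil => intro n acc; simp [digitsOf, divIter]
  | cons x xs ih =>
      intro n acc
      simp only [List.foldl_cons, List.length_cons, digitsOf, divIter, ih,
        List.append_assoc, List.singleton_append]

lemma outerA_fold (len : Int) (k : Nat) : ∀ (i : Int) (out : List (List String)) (batch : List String),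
    (let fin := (PySem.List.pyRange i (i + k) 1).foldl
      (fun (st : List (List String) × List String) j =>
        let inner := (PySem.List.pyRange 0 len 1).foldl
          (fun (pn : List Char × Int) _ =>
            (pvCharAt (PySem.Int.mod pn.2 62) :: pn.1, PySem.Int.floordiv pn.2 62))
          ([], j)
        let passwords := st.2 ++ [String.mk inner.1]
        if 10000 ≤ passwords.length then (st.1 ++ [passwords], []) else (st.1, passwords))
      (out, batch)
     if fin.2 ≠ [] then fin.1 ++ [fin.2] else fin.1)
      = goSpec (len - 0).toNat k i out batch := by
  induction k with
  | zero =>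
      intro i out batch
      rw [show i + (0 : Nat) = i by omega, PySem.List.pyRange_one_eq_nil (le_refl i)]
      rfl
  | succ k ih =>
      intro i out batch
      rw [show i + ((k + 1 : Nat) : Int) = (i + 1) + (k : Nat) by push_cast; ring]
      rw [PySem.List.pyRange_one_cons (show i < (i + 1) + (k : Nat) by omega)]
      simp only [List.foldl_cons]
      rw [innerA_fold]
      have hlen : (PySem.List.pyRange 0 len 1).length = (len - 0).toNat :=
        PySem.List.length_pyRange_one 0 len
      simp only [hlen, List.append_nil]
      by_cases h : 10000 ≤ (batch ++ [pwOf (len - 0).toNat i]).length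
      · simp only [pwOf] at h ⊢
        simp only [if_pos h, ih, goSpec, pwOf, if_pos h]
      · simp only [pwOf] at h ⊢
        simp only [if_neg h, ih, goSpec, pwOf, if_neg h]

lemma outerB_fold (len : Nat) (l : List Int) : ∀ (i : Int) (out : List (List String)) (batch : List String),
    (let fin := l.foldl
      (fun (st : List (List String) × List String × List Int) _ =>
        let b := st.2.1 ++ [String.mk (st.2.2.reverse.map pvCharAt)]
        let digits := pvIncGo 62 1 st.2.2
        if 10000 ≤ b.length then (st.1 ++ [b], [], digits) else (st.1, b, digits))
      (out, batch, digitsOf len i)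
     if fin.2.1 ≠ [] then fin.1 ++ [fin.2.1] else fin.1)
      = goSpec len l.length i out batch := by
  induction l with
  | nil => intro i out batch; rfl
  | cons x xs ih =>
      intro i out batch
      simp only [List.foldl_cons, List.length_cons]
      rw [incGo_digitsOf len i 1 (by norm_num)]
      by_cases h : 10000 ≤ (batch ++ [String.mk ((digitsOf len i).reverse.map pvCharAt)]).length
      · simp only [if_pos h, ih, goSpec, pwOf, if_pos h]
      · simp only [if_neg h, ih, goSpec, pwOf, if_neg h]

-- ===== VERDICT (by name: the statement is the Claim_ definition above) =====
theorem generate_passwords_in_range_spec : Claim_equal_generate_passwords_in_range := by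
  intro start end_ length _
  unfold Spec_generate_passwords_in_range
  simp only [generate_passwords_in_range, generate_passwords_in_range_alt]
  by_cases hstop : end_ ≤ start
  · rw [if_pos hstop, PySem.List.pyRange_one_eq_nil hstop]
    rfl
  rw [if_neg hstop]
  rw [initB_fold]
  simp only [List.nil_append]
  have hlen : (PySem.List.pyRange 0 length 1).length = (length - 0).toNat :=
    PySem.List.length_pyRange_one 0 length
  rw [hlen]
  have hB := outerB_fold (length - 0).toNat (PySem.List.pyRange 0 (end_ - start) 1) start [] []
  rw [PySem.List.length_pyRange_one 0 (end_ - start)] at hB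
  rw [hB]
  have hA := outerA_fold length (end_ - start - 0).toNat start [] []
  rw [show start + ((end_ - start - 0).toNat : Int) = end_ by omega] at hA
  rw [hA]
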